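-- pv_equiv track=rewrite | github.com/DavidEngelman/thesis | utils.py | rename_percentages
-- ===== SOURCE A (Python) =====
-- def rename_percentages(f_list, f_string):
--
--     var_num = []
--     for line in f_list:
--         if len(line.strip()) != 0 and line.strip()[0] == "%":
--             real_instr_num = line.strip().split(" ")[0][1:]
--             var_num.append(int(real_instr_num))
--
--     var_num.sort()
--
--     i = 0
--     new_file = f_string
--     for line in f_list:
--         if len(line.strip()) != 0 and line.strip()[0] == "%":
--
--             real_instr_num = line.strip().split(" ")[0][1:]
--
--             new_file = new_file.replace("%" + str(real_instr_num) + " ", "@&@'" + str(var_num[i]) + " ")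
--             new_file = new_file.replace("%" + str(real_instr_num) + ",", "@&@'" + str(var_num[i]) + ",")
--             new_file = new_file.replace("%" + str(real_instr_num) + "\n", "@&@'" + str(var_num[i]) + "\n")
--
--             i += 1
--     new_file = new_file.replace("@&@'", '%')
--     return new_file
-- ===== SOURCE B (Python) =====
-- def rename_percentages(f_list, f_string):
--     # Collect the raw instruction tokens of the %-lines, in order.
--     toks = []
--     for line in f_list:
--         t = line.strip()
--         if t and t[0] == "%":
--             toks.append(t.split(" ")[0][1:])
--
--     vals = sorted(int(t) for t in toks)
--
--     # First occurrence of a token decides its renamed value.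
--     mapping = {}
--     for t, v in zip(toks, vals):
--         mapping.setdefault(t, str(v))
--
--     delims = (" ", ",", "\n")
--
--     # One left-to-right pass over f_string: at each '%', the candidate token
--     # runs up to the next delimiter; a known candidate is renamed in place.
--     out = []
--     i = 0
--     n = len(f_string)
--     while i < n:
--         c = f_string[i]
--         if c == "%":
--             j = i + 1
--             while j < n and f_string[j] not in delims:
--                 j += 1
--             if j < n:
--                 val = mapping.get(f_string[i + 1:j])
--                 if val is not None:
--                     out.append("%" + val + f_string[j])
--                     i = j + 1
--                     continue
--         out.append(c)
--         i += 1
--     return "".join(out)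
-- ===== Notes on version B (the rewrite author's own statement) =====
-- stated objective: alternative
-- what changed: Instead of A's pass over the whole text for every %-line (three str.replace calls per line plus a final sentinel pass), B builds a first-occurrence token-to-sorted-value dict once and renames in a single left-to-right scan of the text, reading each candidate token up to the next delimiter.
-- intended difference: On texts containing A's internal sentinel "@&@'", A returns the text with every such occurrence rewritten to '%' (a leak of its temporary marker), while B leaves those characters untouched, which is the intended behaviour. — e.g. on rename_percentages([], "@&@'"): A returns "%", B returns "@&@'"
-- outside the precondition, e.g. on rename_percentages(['%\n5 x'], '%\n5 a'): A returns '%5 a', B returns '%\n5 a'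
import Mathlib
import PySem

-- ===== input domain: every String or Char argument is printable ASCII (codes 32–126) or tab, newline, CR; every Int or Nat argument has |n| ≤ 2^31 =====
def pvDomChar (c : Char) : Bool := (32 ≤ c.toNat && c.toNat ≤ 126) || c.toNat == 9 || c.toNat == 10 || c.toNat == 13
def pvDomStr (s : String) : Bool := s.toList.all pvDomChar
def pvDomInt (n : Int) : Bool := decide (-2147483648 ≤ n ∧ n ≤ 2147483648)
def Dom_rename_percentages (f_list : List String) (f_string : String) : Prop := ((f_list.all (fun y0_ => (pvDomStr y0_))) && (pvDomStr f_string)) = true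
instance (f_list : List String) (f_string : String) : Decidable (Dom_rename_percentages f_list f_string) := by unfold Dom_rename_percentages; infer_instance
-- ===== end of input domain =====

-- B renames %-tokens in one left-to-right scan with a first-occurrence token→sorted-value dict,
-- instead of A's whole-text replace pass per %-line (a different algorithm, same result).

-- helpers shared by both ports (the token-extraction expression is identical in both Pythons)
-- line.strip()  (on char lists)
def pvStripL (line : String) : List Char := PySem.Chars.strip line.toList
-- len(t) != 0 and t[0] == "%"
def pvIsPctLine (st : List Char) : Bool := (st.length != 0) && (PySem.List.pyGetD st 0 ' ' == '%')
-- t.split(" ")[0][1:]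
def pvTokOf (st : List Char) : List Char :=
  PySem.List.slice (PySem.List.pyGetD (PySem.Chars.splitOn st [' ']) 0 []) (some 1) none

-- ===== PORT A =====
-- the sentinel string "@&@'" A substitutes and then rewrites to '%'
def pvSent : List Char := ['@', '&', '@', '\'']

def rename_percentages (f_list : List String) (f_string : String) : String :=
  let var_num : List Int := f_list.foldl (fun acc line =>
    if pvIsPctLine (pvStripL line) then
      acc ++ [(PySem.Int.ofChars? (pvTokOf (pvStripL line))).getD 0]
    else acc) []
  let var_num := PySem.List.sorted var_num (fun x => x)
  let res := f_list.foldl (fun (p : Int × List Char) line =>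
    if pvIsPctLine (pvStripL line) then
      (p.1 + 1,
        PySem.Chars.replace
          (PySem.Chars.replace
            (PySem.Chars.replace p.2
              ('%' :: (pvTokOf (pvStripL line) ++ [' ']))
              (pvSent ++ PySem.Int.toChars (PySem.List.pyGetD var_num p.1 0) ++ [' ']))
            ('%' :: (pvTokOf (pvStripL line) ++ [',']))
            (pvSent ++ PySem.Int.toChars (PySem.List.pyGetD var_num p.1 0) ++ [',']))
          ('%' :: (pvTokOf (pvStripL line) ++ ['\n']))
          (pvSent ++ PySem.Int.toChars (PySem.List.pyGetD var_num p.1 0) ++ ['\n']))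
    else p) ((0 : Int), f_string.toList)
  String.ofList (PySem.Chars.replace res.2 pvSent ['%'])

-- ===== PORT B =====
def pvIsDelim (c : Char) : Bool := c == ' ' || c == ',' || c == '\n'

-- the single scan: at '%' the candidate token runs to the next delimiter
def pvScan (m : PySem.Dict (List Char) (List Char)) : List Char → List Char
  | [] => []
  | c :: r =>
    if c == '%' then
      match hdrop : r.dropWhile (fun x => !pvIsDelim x) with
      | d :: r2 =>
        match m.get? (r.takeWhile (fun x => !pvIsDelim x)) with
        | some v => '%' :: (v ++ d :: pvScan m r2)
        | none => c :: pvScan m r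
      | [] => c :: pvScan m r
    else c :: pvScan m r
termination_by s => s.length
decreasing_by
  · have h := List.length_dropWhile_le (fun x => !pvIsDelim x) r
    rw [hdrop] at h; simp at h ⊢; omega
  · simp
  · simp
  · simp

def rename_percentages_alt (f_list : List String) (f_string : String) : String :=
  let toks : List (List Char) := f_list.foldl (fun acc line =>
    if pvIsPctLine (pvStripL line) then acc ++ [pvTokOf (pvStripL line)] else acc) []
  let vals : List Int :=
    PySem.List.sorted (toks.map (fun t => (PySem.Int.ofChars? t).getD 0)) (fun x => x)
  let mapping : PySem.Dict (List Char) (List Char) :=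
    (toks.zip vals).foldl (fun d p => d.setdefault p.1 (PySem.Int.toChars p.2)) PySem.Dict.empty
  String.ofList (pvScan mapping f_string.toList)

-- ===== PRECONDITION & SPEC =====
def pvTokChar (c : Char) : Bool := c.isDigit || c == '+' || c == '-' || c == '_' || c == '\t' || c == '\r'

-- Pre_ excludes (i) inputs on which A raises ValueError (a %-line whose first word after '%' is not
-- int-parsable) and (ii) %-lines whose token contains an embedded newline or non-tab/CR whitespace —
-- a degenerate "line", on which which replacement wins depends on A's accidental replace order.
def Pre_rename_percentages (f_list : List String) (_f_string : String) : Prop :=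
  ∀ line ∈ f_list,
    pvIsPctLine (pvStripL line) = true →
      (PySem.Int.ofChars? (pvTokOf (pvStripL line))).isSome = true ∧
      (pvTokOf (pvStripL line)).all pvTokChar = true

instance (f_list : List String) (f_string : String) : Decidable (Pre_rename_percentages f_list f_string) := by
  unfold Pre_rename_percentages; infer_instance

def pvWitness_rename_percentages : List String × String := (["%2 a", "%1 b,c"], "go %2 x,%1\n")

-- On texts containing A's internal sentinel "@&@'", A returns the text with every such occurrence
-- rewritten to '%' (a leak of its temporary marker), while B leaves those characters untouched,
-- which is the intended behaviour.
def D_rename_percentages (_f_list : List String) (f_string : String) : Prop :=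
  PySem.Str.isIn "@&@'" f_string = true

instance (f_list : List String) (f_string : String) : Decidable (D_rename_percentages f_list f_string) := by
  unfold D_rename_percentages; infer_instance

def Spec_rename_percentages (f_list : List String) (f_string : String) (out : String) : Prop :=
  ¬ D_rename_percentages f_list f_string → out = rename_percentages_alt f_list f_string

instance (f_list : List String) (f_string : String) (out : String) : Decidable (Spec_rename_percentages f_list f_string out) := by
  unfold Spec_rename_percentages; infer_instance

def pvDiffWitness_rename_percentages : List String × String := ([], "@&@'")
def pvDiffWitnessOut_rename_percentages : String × String := ("%", "@&@'")

-- ===== CLAIM (what is proved, stated in full; the proofs are below) =====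
def Claim_unchanged_rename_percentages : Prop := ∀ (f_list : List String) (f_string : String), Dom_rename_percentages f_list f_string → Pre_rename_percentages f_list f_string → Spec_rename_percentages f_list f_string (rename_percentages f_list f_string)
def Claim_changed_rename_percentages : Prop := Dom_rename_percentages (pvDiffWitness_rename_percentages.1) (pvDiffWitness_rename_percentages.2) ∧ Pre_rename_percentages (pvDiffWitness_rename_percentages.1) (pvDiffWitness_rename_percentages.2) ∧ D_rename_percentages (pvDiffWitness_rename_percentages.1) (pvDiffWitness_rename_percentages.2) ∧ rename_percentages (pvDiffWitness_rename_percentages.1) (pvDiffWitness_rename_percentages.2) = pvDiffWitnessOut_rename_percentages.1 ∧ rename_percentages_alt (pvDiffWitness_rename_percentages.1) (pvDiffWitness_rename_percentages.2) = pvDiffWitnessOut_rename_percentages.2 ∧ pvDiffWitnessOut_rename_percentages.1 ≠ pvDiffWitnessOut_rename_percentages.2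
def Claim_exact_rename_percentages : Prop := ∀ (f_list : List String) (f_string : String), Dom_rename_percentages f_list f_string → Pre_rename_percentages f_list f_string → D_rename_percentages f_list f_string → rename_percentages f_list f_string ≠ rename_percentages_alt f_list f_string

-- ===== LEMMAS AND PROOFS =====

def pvRep (pat rtext : List Char) : List Char → List Char
  | [] => []
  | c :: t =>
    if pat ≠ [] ∧ pat.isPrefixOf (c :: t) then rtext ++ pvRep pat rtext ((c :: t).drop pat.length)
    else c :: pvRep pat rtext t
termination_by s => s.length
decreasing_by
  all_goals simp
  rename_i h
  cases pat with
  | nil => exact absurd rfl h.1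
  | cons a q => simp

theorem pvRep_cons_not_prefix {pat : List Char} (rtext : List Char) {c : Char} {t : List Char}
    (h : ¬ pat <+: (c :: t)) : pvRep pat rtext (c :: t) = c :: pvRep pat rtext t := by
  rw [pvRep]; simp [List.isPrefixOf_iff_prefix, h]

theorem pvRep_head_prefix (pat rtext z : List Char) (h : pat ≠ []) :
    pvRep pat rtext (pat ++ z) = rtext ++ pvRep pat rtext z := by
  cases pat with
  | nil => exact absurd rfl h
  | cons a q =>
    rw [List.cons_append, pvRep]
    rw [if_pos ⟨h, by simp [List.isPrefixOf_iff_prefix]⟩]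
    congr 1
    rw [← List.cons_append, List.drop_left]

theorem pvRep_append_no_hit {pat : List Char} (rtext : List Char) {a b : List Char}
    (H : ∀ i < a.length, ¬ pat <+: (a ++ b).drop i) :
    pvRep pat rtext (a ++ b) = a ++ pvRep pat rtext b := by
  induction a with
  | nil => simp
  | cons c a' ih =>
    have h0 := H 0 (by simp)
    simp only [List.drop_zero, List.cons_append] at h0 ⊢
    rw [pvRep_cons_not_prefix rtext h0]
    rw [ih (fun i hi => by have := H (i+1) (by simp; omega); simpa using this)]

theorem pvNoHit {h0 : Char} {q a b : List Char} (ha : ∀ c ∈ a, c ≠ h0) :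
    ∀ i < a.length, ¬ (h0 :: q) <+: (a ++ b).drop i := by
  intro i hi hpre
  have hdrop : (a ++ b).drop i = a.drop i ++ b := List.drop_append_of_le_length (by omega)
  have hne : a.drop i ≠ [] := by simp [List.drop_eq_nil_iff]; omega
  have h1 : ((a ++ b).drop i).head? = some h0 := by
    obtain ⟨k, hk⟩ := hpre; rw [← hk]; simp
  rw [hdrop, List.head?_append_of_ne_nil _ hne] at h1
  have : a.drop i ≠ [] → (a.drop i).head? = some ((a.drop i).head hne) := fun h => List.head?_eq_some_head ..
  rw [this hne] at h1
  have hmem : (a.drop i).head hne ∈ a := List.mem_of_mem_drop (List.head_mem hne)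
  exact ha _ hmem (by injection h1)

theorem pvGo (pat rtext : List Char) (hpat : pat ≠ []) :
    ∀ (fuel : Nat) (l acc : List Char), l.length ≤ fuel →
      PySem.Chars.replace.go pat rtext fuel l acc = acc.reverse ++ pvRep pat rtext l := by
  intro fuel
  induction fuel with
  | zero =>
    intro l acc h
    have : l = [] := by cases l <;> simp_all
    subst this; simp [PySem.Chars.replace.go, pvRep]
  | succ f ih =>
    intro l acc h
    cases l with
    | nil => simp [PySem.Chars.replace.go, pvRep]
    | cons c t =>
      rw [PySem.Chars.replace.go]
      by_cases hp : pat.isPrefixOf (c :: t)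
      · rw [if_pos hp]
        have hlen : 1 ≤ pat.length := List.length_pos_of_ne_nil hpat
        rw [ih _ _ (by simp at h ⊢; omega)]
        rw [pvRep, if_pos ⟨hpat, hp⟩]
        simp
      · rw [if_neg hp, ih _ _ (by simp at h; omega)]
        rw [pvRep_cons_not_prefix rtext (by rwa [List.isPrefixOf_iff_prefix] at hp)]
        simp

theorem pvRep_eq_replace (pat rtext s : List Char) (h : pat ≠ []) :
    PySem.Chars.replace s pat rtext = pvRep pat rtext s := by
  rw [PySem.Chars.replace, if_neg (by simpa using h)]
  simpa using pvGo pat rtext h s.length s [] le_rfl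

theorem pvDropWhile_head_false {p : Char → Bool} {r : List Char} {d : Char} {r2 : List Char}
    (h : List.dropWhile p r = d :: r2) : p d = false := by
  have hne : List.dropWhile p r ≠ [] := by rw [h]; simp
  have h2 := List.head_dropWhile_not (l := r) (p := p) hne
  have h3 : (List.dropWhile p r).head hne = d := by
    apply Option.some_injective
    rw [← List.head?_eq_some_head]
    rw [h]; simp
  rwa [h3] at h2

inductive PvSeg where
  | chr (c : Char)
  | mat (t v : List Char) (d : Char)
deriving DecidableEq, Repr
def pvSegs (look : List Char → Option (List Char)) : List Char → List PvSeg
  | [] => []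
  | c :: r =>
    if c == '%' then
      match hdrop : r.dropWhile (fun x => !pvIsDelim x) with
      | d :: r2 =>
        match look (r.takeWhile (fun x => !pvIsDelim x)) with
        | some v => .mat (r.takeWhile (fun x => !pvIsDelim x)) v d :: pvSegs look r2
        | none => .chr c :: pvSegs look r
      | [] => .chr c :: pvSegs look r
    else .chr c :: pvSegs look r
termination_by s => s.length
decreasing_by
  · have h := List.length_dropWhile_le (fun x => !pvIsDelim x) r
    rw [hdrop] at h; simp at h ⊢; omega
  · simp
  · simp
  · simp
def pvFlat (g : List Char → Char → Bool) : List PvSeg → List Char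
  | [] => []
  | .chr c :: L => c :: pvFlat g L
  | .mat t v d :: L => (if g t d then pvSent ++ v ++ [d] else '%' :: (t ++ [d])) ++ pvFlat g L

theorem pvSegs_mat {look : List Char → Option (List Char)} {c : Char} {r : List Char}
    (hc : (c == '%') = true) {d : Char} {r2 : List Char}
    (hdrop : List.dropWhile (fun x => !pvIsDelim x) r = d :: r2) {v : List Char}
    (hlook : look (List.takeWhile (fun x => !pvIsDelim x) r) = some v) :
    pvSegs look (c :: r) = .mat (List.takeWhile (fun x => !pvIsDelim x) r) v d :: pvSegs look r2 := by
  rw [pvSegs]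
  simp only [hc, if_true]
  split
  · rename_i d' r2' h'
    rw [hdrop] at h'; injection h' with h1 h2; subst h1; subst h2
    rw [hlook]
  · rename_i h'; rw [hdrop] at h'; cases h'

theorem pvSegs_pctnolook {look : List Char → Option (List Char)} {c : Char} {r : List Char}
    (hc : (c == '%') = true) {d : Char} {r2 : List Char}
    (hdrop : List.dropWhile (fun x => !pvIsDelim x) r = d :: r2)
    (hlook : look (List.takeWhile (fun x => !pvIsDelim x) r) = none) :
    pvSegs look (c :: r) = .chr c :: pvSegs look r := by
  rw [pvSegs]
  simp only [hc, if_true]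
  split
  · rename_i d' r2' h'
    rw [hdrop] at h'; injection h' with h1 h2; subst h1; subst h2
    rw [hlook]
  · rfl

theorem pvSegs_pctnodrop {look : List Char → Option (List Char)} {c : Char} {r : List Char}
    (hc : (c == '%') = true)
    (hdrop : List.dropWhile (fun x => !pvIsDelim x) r = []) :
    pvSegs look (c :: r) = .chr c :: pvSegs look r := by
  rw [pvSegs]
  simp only [hc, if_true]
  split
  · rename_i d' r2' h'; rw [hdrop] at h'; cases h'
  · rfl

theorem pvSegs_chr {look : List Char → Option (List Char)} {c : Char} {r : List Char}
    (hc : ¬ (c == '%') = true) :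
    pvSegs look (c :: r) = .chr c :: pvSegs look r := by
  rw [pvSegs]; simp only [if_neg hc]

theorem pvSegs_nil (look : List Char → Option (List Char)) : pvSegs look [] = [] := by rw [pvSegs]

theorem pvFlat_false (look : List Char → Option (List Char)) (s : List Char) :
    pvFlat (fun _ _ => false) (pvSegs look s) = s := by
  induction s using pvSegs.induct look with
  | case1 => simp [pvSegs_nil, pvFlat]
  | case2 c r hc d r2 hdrop v hlook ih =>
    rw [pvSegs_mat hc hdrop hlook, pvFlat, ih]
    simp only [Bool.false_eq_true, if_false]
    have hc' : c = '%' := by simpa using hc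
    subst hc'
    show '%' :: (List.takeWhile (fun x => !pvIsDelim x) r ++ [d] ++ r2) = '%' :: r
    rw [List.append_assoc, List.singleton_append, ← hdrop, List.takeWhile_append_dropWhile]
  | case3 c r hc d r2 hdrop hlook ih => rw [pvSegs_pctnolook hc hdrop hlook, pvFlat, ih]
  | case4 c r hc hdrop ih => rw [pvSegs_pctnodrop hc hdrop, pvFlat, ih]
  | case5 c r hc ih => rw [pvSegs_chr hc, pvFlat, ih]

def pvOut : List PvSeg → List Char
  | [] => []
  | .chr c :: L => c :: pvOut L
  | .mat _ v d :: L => '%' :: (v ++ d :: pvOut L)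

theorem pvScan_eq_out (m : PySem.Dict (List Char) (List Char)) (s : List Char) :
    pvScan m s = pvOut (pvSegs m.get? s) := by
  induction s using pvSegs.induct m.get? with
  | case1 => rw [pvSegs_nil, pvScan, pvOut]
  | case2 c r hc d r2 hdrop v hlook ih =>
    rw [pvSegs_mat hc hdrop hlook, pvOut, ← ih, pvScan]
    simp only [hc, if_true]
    split
    · rename_i d' r2' h'
      rw [hdrop] at h'; injection h' with h1 h2; subst h1; subst h2
      rw [hlook]
    · rename_i h'; rw [hdrop] at h'; cases h'
  | case3 c r hc d r2 hdrop hlook ih =>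
    rw [pvSegs_pctnolook hc hdrop hlook, pvOut, ← ih, pvScan]
    simp only [hc, if_true]
    split
    · rename_i d' r2' h'
      rw [hdrop] at h'; injection h' with h1 h2; subst h1; subst h2
      rw [hlook]
    · rfl
  | case4 c r hc hdrop ih =>
    rw [pvSegs_pctnodrop hc hdrop, pvOut, ← ih, pvScan]
    simp only [hc, if_true]
    split
    · rename_i d' r2' h'; rw [hdrop] at h'; cases h'
    · rfl
  | case5 c r hc ih =>
    rw [pvSegs_chr hc, pvOut, ← ih, pvScan]
    simp only [if_neg hc]

theorem pvSeg_mat_mem {look : List Char → Option (List Char)} {s t v : List Char} {d : Char}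
    (h : PvSeg.mat t v d ∈ pvSegs look s) : look t = some v ∧ pvIsDelim d = true := by
  induction s using pvSegs.induct look with
  | case1 => rw [pvSegs_nil] at h; cases h
  | case2 c r hc d' r2 hdrop v' hlook ih =>
    rw [pvSegs_mat hc hdrop hlook] at h
    rcases List.mem_cons.1 h with h1 | h2
    · injection h1 with e1 e2 e3
      subst e1; subst e2; subst e3
      refine ⟨hlook, ?_⟩
      have := pvDropWhile_head_false hdrop
      simpa using this
    · exact ih h2
  | case3 c r hc d' r2 hdrop hlook ih =>
    rw [pvSegs_pctnolook hc hdrop hlook] at h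
    rcases List.mem_cons.1 h with h1 | h2
    · cases h1
    · exact ih h2
  | case4 c r hc hdrop ih =>
    rw [pvSegs_pctnodrop hc hdrop] at h
    rcases List.mem_cons.1 h with h1 | h2
    · cases h1
    · exact ih h2
  | case5 c r hc ih =>
    rw [pvSegs_chr hc] at h
    rcases List.mem_cons.1 h with h1 | h2
    · cases h1
    · exact ih h2

def pvCleanStr (t : List Char) : Prop := ∀ c ∈ t, c ≠ '%' ∧ c ≠ '@' ∧ pvIsDelim c = false
def pvLookClean (look : List Char → Option (List Char)) : Prop :=
  ∀ t v, look t = some v → pvCleanStr t ∧ pvCleanStr v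

theorem pvFlat_congr {g g' : List Char → Char → Bool} {L : List PvSeg}
    (h : ∀ t v d, PvSeg.mat t v d ∈ L → g t d = g' t d) : pvFlat g L = pvFlat g' L := by
  induction L with
  | nil => rfl
  | cons seg L ih =>
    cases seg with
    | chr c => rw [pvFlat, pvFlat, ih (fun t v d hm => h t v d (List.mem_cons_of_mem _ hm))]
    | mat t v d =>
      rw [pvFlat, pvFlat, ih (fun t v d hm => h t v d (List.mem_cons_of_mem _ hm)),
        h t v d (List.mem_cons_self ..)]

theorem pvPrefix_transfer {look : List Char → Option (List Char)}
    {g : List Char → Char → Bool} {s : List Char} {w : List Char} (hw : w ≠ [])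
    (hwc : ∀ c ∈ w, c ≠ '%' ∧ c ≠ '@')
    (h : w <+: pvFlat g (pvSegs look s)) : w <+: s := by
  induction s using pvSegs.induct look generalizing w with
  | case1 =>
    rw [pvSegs_nil] at h
    simp only [pvFlat] at h
    exact absurd (List.prefix_nil.1 h) hw
  | case2 c r hc d r2 hdrop v hlook ih =>
    rw [pvSegs_mat hc hdrop hlook, pvFlat] at h
    cases w with
    | nil => exact absurd rfl hw
    | cons w0 w' =>
      exfalso
      obtain ⟨k, hk⟩ := h
      split at hk
      · simp only [pvSent, List.cons_append, List.append_assoc] at hk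
        injection hk with h1 _
        exact (hwc w0 (by simp)).2 h1
      · simp only [List.cons_append] at hk
        injection hk with h1 _
        exact (hwc w0 (by simp)).1 h1
  | case3 c r hc d r2 hdrop hlook ih =>
    rw [pvSegs_pctnolook hc hdrop hlook, pvFlat] at h
    cases w with
    | nil => exact absurd rfl hw
    | cons w0 w' =>
      obtain ⟨k, hk⟩ := h
      simp only [List.cons_append] at hk
      injection hk with h1 h2
      subst h1
      by_cases hw' : w' = []
      · subst hw'; exact ⟨r, rfl⟩
      · exact List.cons_prefix_cons.2 ⟨rfl, ih hw' (fun x hx => hwc x (by simp [hx])) ⟨k, h2⟩⟩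
  | case4 c r hc hdrop ih =>
    rw [pvSegs_pctnodrop hc hdrop, pvFlat] at h
    cases w with
    | nil => exact absurd rfl hw
    | cons w0 w' =>
      obtain ⟨k, hk⟩ := h
      simp only [List.cons_append] at hk
      injection hk with h1 h2
      subst h1
      by_cases hw' : w' = []
      · subst hw'; exact ⟨r, rfl⟩
      · exact List.cons_prefix_cons.2 ⟨rfl, ih hw' (fun x hx => hwc x (by simp [hx])) ⟨k, h2⟩⟩
  | case5 c r hc ih =>
    rw [pvSegs_chr hc, pvFlat] at h
    cases w with
    | nil => exact absurd rfl hw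
    | cons w0 w' =>
      obtain ⟨k, hk⟩ := h
      simp only [List.cons_append] at hk
      injection hk with h1 h2
      subst h1
      by_cases hw' : w' = []
      · subst hw'; exact ⟨r, rfl⟩
      · exact List.cons_prefix_cons.2 ⟨rfl, ih hw' (fun x hx => hwc x (by simp [hx])) ⟨k, h2⟩⟩

theorem pvChain {t cand z : List Char} {d d'' : Char}
    (ht : ∀ c ∈ t, pvIsDelim c = false) (hcand : ∀ c ∈ cand, pvIsDelim c = false)
    (hd : pvIsDelim d = true) (hd'' : pvIsDelim d'' = true)
    (h : t ++ [d] <+: cand ++ [d''] ++ z) : t = cand ∧ d = d'' := by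
  induction t generalizing cand with
  | nil =>
    cases cand with
    | nil =>
      refine ⟨rfl, ?_⟩
      have h' : [d] <+: d'' :: z := by simpa using h
      exact (List.cons_prefix_cons.1 h').1
    | cons c0 c' =>
      exfalso
      simp only [List.nil_append, List.cons_append] at h
      have := (List.cons_prefix_cons.1 h).1
      rw [this] at hd
      rw [hcand c0 (by simp)] at hd
      cases hd
  | cons a t' ih =>
    cases cand with
    | nil =>
      exfalso
      simp only [List.cons_append, List.nil_append] at h
      have := (List.cons_prefix_cons.1 h).1
      rw [this] at ht
      rw [ht d'' (by simp)] at hd''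
      cases hd''
    | cons c0 c' =>
      simp only [List.cons_append] at h
      obtain ⟨h1, h2⟩ := List.cons_prefix_cons.1 h
      obtain ⟨e1, e2⟩ := ih (fun x hx => ht x (by simp [hx]))
        (fun x hx => hcand x (by simp [hx])) h2
      exact ⟨by rw [h1, e1], e2⟩

theorem pvSent_no_pct : ∀ x ∈ pvSent, x ≠ '%' := by
  intro x hx
  simp only [pvSent, List.mem_cons, List.not_mem_nil, or_false] at hx
  rcases hx with h | h | h | h <;> subst h <;> decide

theorem pvDelim_ne {x : Char} (h : pvIsDelim x = true) : x ≠ '%' ∧ x ≠ '@' := by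
  simp only [pvIsDelim, Bool.or_eq_true, beq_iff_eq] at h
  rcases h with (h | h) | h <;> subst h <;> exact ⟨by decide, by decide⟩

theorem pvTakeDrop {t : List Char} {d : Char} (z : List Char)
    (ht : ∀ c ∈ t, pvIsDelim c = false) (hd : pvIsDelim d = true) :
    (t ++ d :: z).takeWhile (fun x => !pvIsDelim x) = t ∧
    (t ++ d :: z).dropWhile (fun x => !pvIsDelim x) = d :: z := by
  induction t with
  | nil => simp [hd]
  | cons a t' ih =>
    have ha : pvIsDelim a = false := ht a (by simp)
    obtain ⟨h1, h2⟩ := ih (fun x hx => ht x (by simp [hx]))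
    simp only [List.cons_append, List.takeWhile_cons, List.dropWhile_cons, ha]
    simp [h1, h2]

theorem pvRep_flat {look : List Char → Option (List Char)} (hcl : pvLookClean look)
    (g : List Char → Char → Bool) {t v : List Char} {d : Char}
    (hd : pvIsDelim d = true) (ht : pvCleanStr t) (hv : pvCleanStr v)
    (hlook0 : ∃ v0, look t = some v0)
    (hH : (∀ d', pvIsDelim d' = true → g t d' = true) ∨ look t = some v)
    (s : List Char) :
    pvRep ('%' :: (t ++ [d])) (pvSent ++ v ++ [d]) (pvFlat g (pvSegs look s))
      = pvFlat (fun t' d' => g t' d' || (t' == t && d' == d)) (pvSegs look s) := by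
  have hwc : ∀ c ∈ t ++ [d], c ≠ '%' ∧ c ≠ '@' := by
    intro c hc
    rcases List.mem_append.1 hc with hc | hc
    · exact ⟨(ht c hc).1, (ht c hc).2.1⟩
    · simp at hc; subst hc; exact pvDelim_ne hd
  induction s using pvSegs.induct look with
  | case1 => rw [pvSegs_nil]; simp [pvFlat, pvRep]
  | case2 c r hc d'' r2 hdrop v'' hlook ih =>
    have hc' : c = '%' := by simpa using hc
    have hcand : pvCleanStr (List.takeWhile (fun x => !pvIsDelim x) r) := (hcl _ _ hlook).1
    have hv'' : pvCleanStr v'' := (hcl _ _ hlook).2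
    have hd2 : pvIsDelim d'' = true := by
      have := pvDropWhile_head_false hdrop; simpa using this
    rw [pvSegs_mat hc hdrop hlook]; simp only [pvFlat]
    set cand := List.takeWhile (fun x => !pvIsDelim x) r with hcdef
    by_cases hcd : cand = t ∧ d'' = d
    · obtain ⟨e1, e2⟩ := hcd; subst e1; subst e2
      by_cases hg : g cand d''
      · rw [if_pos hg, if_pos (by rw [hg]; simp)]
        rw [pvRep_append_no_hit _ (pvNoHit ?hA), ih]
        case hA =>
          intro x hx
          rcases List.mem_append.1 hx with hx | hx
          · rcases List.mem_append.1 hx with hx | hx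
            · exact pvSent_no_pct x hx
            · exact (hv'' x hx).1
          · simp at hx; subst hx; exact (pvDelim_ne hd2).1
      · rcases hH with hH | hH
        · exact absurd (hH _ hd2) hg
        · have hv2 : v'' = v := by rw [hlook] at hH; injection hH
          subst hv2
          rw [if_neg hg, if_pos (by simp)]
          have : ('%' :: (cand ++ [d''])) ++ pvFlat g (pvSegs look r2)
              = ('%' :: (cand ++ [d''])) ++ pvFlat g (pvSegs look r2) := rfl
          rw [show ('%' :: (cand ++ [d''])) ++ pvFlat g (pvSegs look r2)
              = ('%' :: (cand ++ [d''])) ++ pvFlat g (pvSegs look r2) from rfl]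
          rw [pvRep_head_prefix _ _ _ (by simp), ih]
    · by_cases hg : g cand d''
      · rw [if_pos hg, if_pos (by rw [hg]; simp)]
        rw [pvRep_append_no_hit _ (pvNoHit ?hB), ih]
        case hB =>
          intro x hx
          rcases List.mem_append.1 hx with hx | hx
          · rcases List.mem_append.1 hx with hx | hx
            · exact pvSent_no_pct x hx
            · exact (hv'' x hx).1
          · simp at hx; subst hx; exact (pvDelim_ne hd2).1
      · have hne : (cand == t && d'' == d) = false := by
          rw [Bool.and_eq_false_iff]
          by_cases h1 : cand = t
          · right; subst h1; simp only [beq_eq_false_iff_ne, ne_eq]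
            intro h2; exact hcd ⟨rfl, h2⟩
          · left; simp only [beq_eq_false_iff_ne, ne_eq]; exact h1
        rw [if_neg hg, if_neg (by rw [hne]; simp [hg])]
        rw [pvRep_append_no_hit _ ?hC, ih]
        case hC =>
          intro i hi
          cases i with
          | zero =>
            intro hpre
            simp only [List.drop_zero, List.cons_append] at hpre
            have h2 := (List.cons_prefix_cons.1 hpre).2
            have h3 : t ++ [d] <+: cand ++ [d''] ++ pvFlat g (pvSegs look r2) := by
              simpa [List.append_assoc] using h2
            obtain ⟨e1, e2⟩ := pvChain (fun x hx => (ht x hx).2.2)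
              (fun x hx => (hcand x hx).2.2) hd hd2 h3
            exact hcd ⟨e1.symm, e2.symm⟩
          | succ i' =>
            simp only [List.length_cons] at hi
            intro hpre
            have : ¬ ('%' :: (t ++ [d])) <+: ((cand ++ [d'']) ++ pvFlat g (pvSegs look r2)).drop i' := by
              refine pvNoHit ?_ i' (by simpa using hi)
              intro x hx
              rcases List.mem_append.1 hx with hx | hx
              · exact (hcand x hx).1
              · simp at hx; subst hx; exact (pvDelim_ne hd2).1
            apply this
            simpa [List.cons_append] using hpre
  | case3 c r hc d'' r2 hdrop hlook ih =>
    rw [pvSegs_pctnolook hc hdrop hlook]; simp only [pvFlat]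
    have hc' : c = '%' := by simpa using hc
    rw [pvRep_cons_not_prefix _ ?hn, ih]
    case hn =>
      intro hpre
      subst hc'
      have h2 : t ++ [d] <+: pvFlat g (pvSegs look r) := (List.cons_prefix_cons.1 hpre).2
      have h3 : t ++ [d] <+: r := pvPrefix_transfer (by simp) hwc h2
      obtain ⟨z, hz⟩ := h3
      rw [List.append_assoc, List.singleton_append] at hz
      obtain ⟨h4, h5⟩ := pvTakeDrop z (fun x hx => (ht x hx).2.2) hd
      rw [← hz] at hlook
      rw [h4] at hlook
      obtain ⟨v0, hv0⟩ := hlook0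
      rw [hv0] at hlook; cases hlook
  | case4 c r hc hdrop ih =>
    rw [pvSegs_pctnodrop hc hdrop]; simp only [pvFlat]
    have hc' : c = '%' := by simpa using hc
    rw [pvRep_cons_not_prefix _ ?hn2, ih]
    case hn2 =>
      intro hpre
      subst hc'
      have h2 : t ++ [d] <+: pvFlat g (pvSegs look r) := (List.cons_prefix_cons.1 hpre).2
      have h3 : t ++ [d] <+: r := pvPrefix_transfer (by simp) hwc h2
      obtain ⟨z, hz⟩ := h3
      rw [List.append_assoc, List.singleton_append] at hz
      obtain ⟨h4, h5⟩ := pvTakeDrop z (fun x hx => (ht x hx).2.2) hd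
      rw [← hz, h5] at hdrop
      cases hdrop
  | case5 c r hc ih =>
    rw [pvSegs_chr hc]; simp only [pvFlat]
    rw [pvRep_cons_not_prefix _ ?hn3, ih]
    case hn3 =>
      intro hpre
      exact hc (by simpa using ((List.cons_prefix_cons.1 hpre).1).symm)


theorem pvU2 {look : List Char → Option (List Char)} {r : List Char}
    (h : ['@','\''] <+: pvFlat (fun _ _ => true) (pvSegs look r)) : ['@','\''] <+: r := by
  induction r using pvSegs.induct look with
  | case1 =>
    rw [pvSegs_nil] at h
    exact absurd (List.prefix_nil.1 h) (by simp)
  | case2 c r hc d r2 hdrop v hlook ih =>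
    exfalso
    rw [pvSegs_mat hc hdrop hlook] at h
    simp only [pvFlat, if_true, pvSent, List.cons_append, List.nil_append] at h
    obtain ⟨-, h2⟩ := List.cons_prefix_cons.1 h
    have h3 := (List.cons_prefix_cons.1 h2).1
    simp at h3
  | case3 c r hc d r2 hdrop hlook ih =>
    rw [pvSegs_pctnolook hc hdrop hlook] at h
    simp only [pvFlat] at h
    obtain ⟨h1, -⟩ := List.cons_prefix_cons.1 h
    exact absurd (by simpa using hc : c = '%') (by rw [← h1]; decide)
  | case4 c r hc hdrop ih =>
    rw [pvSegs_pctnodrop hc hdrop] at h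
    simp only [pvFlat] at h
    obtain ⟨h1, -⟩ := List.cons_prefix_cons.1 h
    exact absurd (by simpa using hc : c = '%') (by rw [← h1]; decide)
  | case5 c r hc ih =>
    rw [pvSegs_chr hc] at h
    simp only [pvFlat] at h
    obtain ⟨h1, h2⟩ := List.cons_prefix_cons.1 h
    subst h1
    have h3 : ['\''] <+: r := pvPrefix_transfer (by simp)
      (by intro x hx; simp at hx; subst hx; exact ⟨by decide, by decide⟩) h2
    exact List.cons_prefix_cons.2 ⟨rfl, h3⟩

theorem pvU3 {look : List Char → Option (List Char)} {r : List Char}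
    (h : ['&','@','\''] <+: pvFlat (fun _ _ => true) (pvSegs look r)) : ['&','@','\''] <+: r := by
  induction r using pvSegs.induct look with
  | case1 =>
    rw [pvSegs_nil] at h
    exact absurd (List.prefix_nil.1 h) (by simp)
  | case2 c r hc d r2 hdrop v hlook ih =>
    exfalso
    rw [pvSegs_mat hc hdrop hlook] at h
    simp only [pvFlat, if_true, pvSent, List.cons_append, List.nil_append] at h
    exact absurd (List.cons_prefix_cons.1 h).1 (by decide)
  | case3 c r hc d r2 hdrop hlook ih =>
    rw [pvSegs_pctnolook hc hdrop hlook] at h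
    simp only [pvFlat] at h
    obtain ⟨h1, -⟩ := List.cons_prefix_cons.1 h
    exact absurd (by simpa using hc : c = '%') (by rw [← h1]; decide)
  | case4 c r hc hdrop ih =>
    rw [pvSegs_pctnodrop hc hdrop] at h
    simp only [pvFlat] at h
    obtain ⟨h1, -⟩ := List.cons_prefix_cons.1 h
    exact absurd (by simpa using hc : c = '%') (by rw [← h1]; decide)
  | case5 c r hc ih =>
    rw [pvSegs_chr hc] at h
    simp only [pvFlat] at h
    obtain ⟨h1, h2⟩ := List.cons_prefix_cons.1 h
    subst h1
    exact List.cons_prefix_cons.2 ⟨rfl, pvU2 h2⟩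

theorem pvRep_sent {look : List Char → Option (List Char)} (hcl : pvLookClean look)
    {s : List Char} (hns : ¬ pvSent <:+: s) :
    pvRep pvSent ['%'] (pvFlat (fun _ _ => true) (pvSegs look s)) = pvOut (pvSegs look s) := by
  induction s using pvSegs.induct look with
  | case1 => rw [pvSegs_nil]; simp [pvFlat, pvOut, pvRep]
  | case2 c r hc d r2 hdrop v hlook ih =>
    rw [pvSegs_mat hc hdrop hlook]
    simp only [pvFlat, pvOut, if_true]
    have hv : pvCleanStr v := (hcl _ _ hlook).2
    have hd2 : pvIsDelim d = true := by
      have := pvDropWhile_head_false hdrop; simpa using this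
    rw [List.append_assoc, List.append_assoc]
    rw [pvRep_head_prefix _ _ _ (by simp [pvSent])]
    rw [← List.append_assoc]
    have hsent : pvSent = '@' :: ['&','@','\''] := rfl
    rw [hsent]
    rw [pvRep_append_no_hit _ (pvNoHit ?hA)]
    rw [← hsent]
    case hA =>
      intro x hx
      rcases List.mem_append.1 hx with hx | hx
      · exact (hv x hx).2.1
      · simp at hx; subst hx; exact (pvDelim_ne hd2).2
    rw [ih ?hns2]
    case hns2 =>
      intro hinf
      apply hns
      have : r2 <:+ c :: r := by
        refine List.IsSuffix.trans ?_ (List.suffix_cons c r)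
        have : List.dropWhile (fun x => !pvIsDelim x) r <:+ r := List.dropWhile_suffix _
        rw [hdrop] at this
        exact List.IsSuffix.trans (List.suffix_cons d r2) this
      exact hinf.trans this.isInfix
    simp
  | case3 c r hc d r2 hdrop hlook ih =>
    rw [pvSegs_pctnolook hc hdrop hlook]
    simp only [pvFlat, pvOut]
    rw [pvRep_cons_not_prefix _ ?hn, ih (fun hinf => hns (hinf.trans (List.suffix_cons c r).isInfix))]
    case hn =>
      intro hpre
      have h1 := (List.cons_prefix_cons.1 (by simpa [pvSent] using hpre)).1
      exact absurd (by simpa using hc : c = '%') (by rw [← h1]; decide)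
  | case4 c r hc hdrop ih =>
    rw [pvSegs_pctnodrop hc hdrop]
    simp only [pvFlat, pvOut]
    rw [pvRep_cons_not_prefix _ ?hn, ih (fun hinf => hns (hinf.trans (List.suffix_cons c r).isInfix))]
    case hn =>
      intro hpre
      have h1 := (List.cons_prefix_cons.1 (by simpa [pvSent] using hpre)).1
      exact absurd (by simpa using hc : c = '%') (by rw [← h1]; decide)
  | case5 c r hc ih =>
    rw [pvSegs_chr hc]
    simp only [pvFlat, pvOut]
    rw [pvRep_cons_not_prefix _ ?hn, ih (fun hinf => hns (hinf.trans (List.suffix_cons c r).isInfix))]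
    case hn =>
      intro hpre
      apply hns
      have hpre' : ['@','&','@','\''] <+: c :: pvFlat (fun _ _ => true) (pvSegs look r) := by
        simpa [pvSent] using hpre
      obtain ⟨h1, h2⟩ := List.cons_prefix_cons.1 hpre'
      subst h1
      have h3 : ['&','@','\''] <+: r := pvU3 h2
      have : pvSent <+: '@' :: r := by
        simp only [pvSent]
        exact List.cons_prefix_cons.2 ⟨rfl, h3⟩
      exact this.isInfix


-- ---- glue: the pair-wise triple replace of A ----
def pvRep3 (cur : List Char) (p : List Char × List Char) : List Char :=
  pvRep ('%' :: (p.1 ++ ['\n'])) (pvSent ++ p.2 ++ ['\n'])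
    (pvRep ('%' :: (p.1 ++ [','])) (pvSent ++ p.2 ++ [','])
      (pvRep ('%' :: (p.1 ++ [' '])) (pvSent ++ p.2 ++ [' ']) cur))

theorem pvRep3_flat {look : List Char → Option (List Char)} (hcl : pvLookClean look)
    (g0 : List Char → Bool) {t v : List Char}
    (ht : pvCleanStr t) (hv : pvCleanStr v)
    (hlook0 : ∃ v0, look t = some v0)
    (hH : g0 t = true ∨ look t = some v)
    (s : List Char) :
    pvRep3 (pvFlat (fun t' _ => g0 t') (pvSegs look s)) (t, v)
      = pvFlat (fun t' _ => g0 t' || (t' == t)) (pvSegs look s) := by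
  have hH' : ∀ g : List Char → Char → Bool, (∀ d', g0 t = true → g t d' = true) →
      ((∀ d', pvIsDelim d' = true → g t d' = true) ∨ look t = some v) := by
    intro g hg
    rcases hH with hH | hH
    · exact Or.inl (fun d' _ => hg d' hH)
    · exact Or.inr hH
  unfold pvRep3
  rw [pvRep_flat hcl _ (by decide) ht hv hlook0 (hH' _ (fun d' h => h)) s]
  rw [pvRep_flat hcl _ (by decide) ht hv hlook0 (hH' _ (fun d' h => by rw [h]; simp)) s]
  rw [pvRep_flat hcl _ (by decide) ht hv hlook0 (hH' _ (fun d' h => by rw [h]; simp)) s]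
  apply pvFlat_congr
  intro t' v' d' hm
  have hd' : pvIsDelim d' = true := (pvSeg_mat_mem hm).2
  by_cases hteq : t' = t
  · subst hteq
    simp only [pvIsDelim, Bool.or_eq_true, beq_iff_eq] at hd'
    rcases hd' with (e | e) | e <;> subst e <;> simp
  · have : (t' == t) = false := by simp [hteq]
    simp [this]

-- the token list both ports collect
def pvToks (f_list : List String) : List (List Char) :=
  ((f_list.map pvStripL).filter pvIsPctLine).map pvTokOf

theorem pvCollect {α : Type} (f : List Char → α) :
    ∀ (fl : List String) (a : List α),
      fl.foldl (fun acc line =>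
        if pvIsPctLine (pvStripL line) then acc ++ [f (pvTokOf (pvStripL line))] else acc) a
      = a ++ (pvToks fl).map f := by
  intro fl
  induction fl with
  | nil => intro a; simp [pvToks]
  | cons line fl ih =>
    intro a
    simp only [List.foldl_cons]
    by_cases hc : pvIsPctLine (pvStripL line) = true
    · rw [if_pos hc, ih]
      simp [pvToks, hc, List.map_map]
    · rw [if_neg hc, ih]
      simp [pvToks, hc, List.map_map]

-- dict built with setdefault = first-match association-list lookup
theorem pvDict_get (k : List Char) :
    ∀ (L : List (List Char × Int)) (d : PySem.Dict (List Char) (List Char)),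
      (L.foldl (fun d p => d.setdefault p.1 (PySem.Int.toChars p.2)) d).get? k
        = (d.get? k).or ((L.lookup k).map PySem.Int.toChars) := by
  intro L
  induction L with
  | nil => intro d; simp
  | cons p L ih =>
    obtain ⟨p1, p2⟩ := p
    intro d
    simp only [List.foldl_cons, List.lookup_cons]
    rw [ih]
    cases hbeq : (k == p1) with
    | true =>
      have hk : k = p1 := by simpa using hbeq
      subst hk
      rw [PySem.Dict.get?_setdefault_self]
      cases hd : d.get? k <;> simp
    | false =>
      have hk : k ≠ p1 := by simpa using hbeq
      rw [PySem.Dict.get?_setdefault_of_ne _ _ hk]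

theorem pvLookup_mem {α : Type} [BEq α] [LawfulBEq α] {β : Type} {L : List (α × β)} {k : α} {b : β}
    (h : L.lookup k = some b) : (k, b) ∈ L := by
  induction L with
  | nil => cases h
  | cons p L ih =>
    obtain ⟨p1, p2⟩ := p
    rw [List.lookup_cons] at h
    cases hbeq : (k == p1) with
    | true =>
      rw [hbeq] at h
      injection h with h
      have hk : k = p1 := by simpa using hbeq
      subst hk; subst h
      simp
    | false =>
      rw [hbeq] at h
      exact List.mem_cons_of_mem _ (ih h)

theorem pvLookup_mem_some {α : Type} [BEq α] [LawfulBEq α] {β : Type} {L : List (α × β)} {p : α × β}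
    (h : p ∈ L) : ∃ b, L.lookup p.1 = some b := by
  induction L with
  | nil => cases h
  | cons q L ih =>
    obtain ⟨q1, q2⟩ := q
    rw [List.lookup_cons]
    cases hbeq : (p.1 == q1) with
    | true => exact ⟨q2, rfl⟩
    | false =>
      rcases List.mem_cons.1 h with h | h
      · subst h; simp at hbeq
      · exact ih h

theorem pvLookup_none {α : Type} [BEq α] [LawfulBEq α] {β : Type} {L : List (α × β)} {k : α}
    (h : ∀ q ∈ L, q.1 ≠ k) : L.lookup k = none := by
  induction L with
  | nil => rfl
  | cons q L ih =>
    obtain ⟨q1, q2⟩ := q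
    rw [List.lookup_cons]
    have hbeq : (k == q1) = false := by
      simp only [beq_eq_false_iff_ne, ne_eq]
      exact fun e => h (q1, q2) (by simp) e.symm
    rw [hbeq]
    exact ih (fun q hq => h q (by simp [hq]))

theorem pvLookup_map_toChars (k : List Char) :
    ∀ (L : List (List Char × Int)),
      (L.map (fun p => (p.1, PySem.Int.toChars p.2))).lookup k = (L.lookup k).map PySem.Int.toChars := by
  intro L
  induction L with
  | nil => rfl
  | cons p L ih =>
    obtain ⟨p1, p2⟩ := p
    simp only [List.map_cons, List.lookup_cons]
    cases hbeq : (k == p1) with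
    | true => simp
    | false => simpa using ih

theorem pvTokChar_clean {c : Char} (h : pvTokChar c = true) :
    c ≠ '%' ∧ c ≠ '@' ∧ pvIsDelim c = false := by
  refine ⟨?_, ?_, ?_⟩
  · intro e; rw [e] at h; exact absurd h (by decide)
  · intro e; rw [e] at h; exact absurd h (by decide)
  · by_contra hb
    simp only [Bool.not_eq_false] at hb
    simp only [pvIsDelim, Bool.or_eq_true, beq_iff_eq] at hb
    rcases hb with (e | e) | e <;> rw [e] at h <;> exact absurd h (by decide)

theorem pvDigitChar_digit {m : Nat} (h : m < 10) : (Nat.digitChar m).isDigit = true := by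
  interval_cases m <;> decide

theorem pvToDigits_digits : ∀ (fuel n : Nat) (acc : List Char),
    (∀ c ∈ acc, c.isDigit = true) → ∀ c ∈ Nat.toDigitsCore 10 fuel n acc, c.isDigit = true := by
  intro fuel
  induction fuel with
  | zero => intro n acc hacc; simpa [Nat.toDigitsCore] using hacc
  | succ f ih =>
    intro n acc hacc c hc
    simp only [Nat.toDigitsCore] at hc
    have hdig : (Nat.digitChar (n % 10)).isDigit = true :=
      pvDigitChar_digit (Nat.mod_lt _ (by norm_num))
    by_cases hz : n / 10 = 0
    · rw [if_pos hz] at hc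
      rcases List.mem_cons.1 hc with e | e
      · subst e; exact hdig
      · exact hacc c e
    · rw [if_neg hz] at hc
      exact ih _ _ (fun x hx => by
        rcases List.mem_cons.1 hx with e | e
        · subst e; exact hdig
        · exact hacc x e) c hc

theorem pvToChars_clean (n : Int) : pvCleanStr (PySem.Int.toChars n) := by
  have hdig : ∀ m : Nat, ∀ c ∈ Nat.toDigits 10 m, c.isDigit = true := by
    intro m c hc
    rw [Nat.toDigits] at hc
    exact pvToDigits_digits (m + 1) m [] (by simp) c hc
  have hstep : ∀ c : Char, c.isDigit = true ∨ c = '-' → c ≠ '%' ∧ c ≠ '@' ∧ pvIsDelim c = false := by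
    intro c hc
    rcases hc with hc | hc
    · refine ⟨?_, ?_, ?_⟩
      · intro e; rw [e] at hc; exact absurd hc (by decide)
      · intro e; rw [e] at hc; exact absurd hc (by decide)
      · by_contra hb
        simp only [Bool.not_eq_false] at hb
        simp only [pvIsDelim, Bool.or_eq_true, beq_iff_eq] at hb
        rcases hb with (e | e) | e <;> rw [e] at hc <;> exact absurd hc (by decide)
    · subst hc; exact ⟨by decide, by decide, by decide⟩
  intro c hc
  rw [PySem.Int.toChars] at hc
  by_cases hneg : n < 0
  · rw [if_pos hneg] at hc
    rcases List.mem_cons.1 hc with e | e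
    · exact hstep c (Or.inr e)
    · exact hstep c (Or.inl (hdig _ c e))
  · rw [if_neg hneg] at hc
    exact hstep c (Or.inl (hdig _ c hc))


theorem pvFold_flat {look : List Char → Option (List Char)} (hcl : pvLookClean look) (s : List Char)
    (AP : List (List Char × List Char))
    (HAP : ∀ p ∈ AP, pvCleanStr p.1 ∧ pvCleanStr p.2)
    (HLOOK : ∀ p ∈ AP, ∃ v0, look p.1 = some v0)
    (HFIRST : ∀ pre p suf, AP = pre ++ p :: suf → (∀ q ∈ pre, q.1 ≠ p.1) → look p.1 = some p.2) :
    ∀ (suf pre : List (List Char × List Char)), AP = pre ++ suf →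
      List.foldl pvRep3 (pvFlat (fun t' _ => pre.any (fun q => t' == q.1)) (pvSegs look s)) suf
        = pvFlat (fun t' _ => AP.any (fun q => t' == q.1)) (pvSegs look s) := by
  intro suf
  induction suf with
  | nil =>
    intro pre hap
    rw [List.append_nil] at hap
    subst hap
    rfl
  | cons p suf ih =>
    intro pre hap
    obtain ⟨t, v⟩ := p
    simp only [List.foldl_cons]
    have hmem : (t, v) ∈ AP := by rw [hap]; exact List.mem_append_right _ (by simp)
    have hcle := HAP _ hmem
    have hH : (pre.any (fun q => t == q.1)) = true ∨ look t = some v := by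
      by_cases hx : (pre.any (fun q => t == q.1)) = true
      · exact Or.inl hx
      · refine Or.inr (HFIRST pre (t, v) suf hap ?_)
        intro q hq e
        apply hx
        rw [List.any_eq_true]
        exact ⟨q, hq, by simp [e]⟩
    rw [pvRep3_flat hcl _ hcle.1 hcle.2 (HLOOK _ hmem) hH s]
    rw [show pvFlat (fun t' _ => pre.any (fun q => t' == q.1) || (t' == t)) (pvSegs look s)
        = pvFlat (fun t' _ => (pre ++ [(t, v)]).any (fun q => t' == q.1)) (pvSegs look s) from
      pvFlat_congr (fun t' v' d' _ => by simp [List.any_append])]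
    exact ih (pre ++ [(t, v)]) (by rw [hap]; simp)

theorem pvToks_cons_pos {line : String} (fl : List String)
    (hc : pvIsPctLine (pvStripL line) = true) :
    pvToks (line :: fl) = pvTokOf (pvStripL line) :: pvToks fl := by
  simp [pvToks, hc]

theorem pvToks_cons_neg {line : String} (fl : List String)
    (hc : ¬ pvIsPctLine (pvStripL line) = true) :
    pvToks (line :: fl) = pvToks fl := by
  simp [pvToks, hc]

theorem pvLoopA (vals : List Int) :
    ∀ (fl : List String) (k : Nat) (cur : List Char),
      k + (pvToks fl).length ≤ vals.length →
      fl.foldl (fun (p : Int × List Char) line =>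
        if pvIsPctLine (pvStripL line) then
          (p.1 + 1,
            PySem.Chars.replace
              (PySem.Chars.replace
                (PySem.Chars.replace p.2
                  ('%' :: (pvTokOf (pvStripL line) ++ [' ']))
                  (pvSent ++ PySem.Int.toChars (PySem.List.pyGetD vals p.1 0) ++ [' ']))
                ('%' :: (pvTokOf (pvStripL line) ++ [',']))
                (pvSent ++ PySem.Int.toChars (PySem.List.pyGetD vals p.1 0) ++ [',']))
              ('%' :: (pvTokOf (pvStripL line) ++ ['\n']))
              (pvSent ++ PySem.Int.toChars (PySem.List.pyGetD vals p.1 0) ++ ['\n']))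
        else p) (((k : Nat) : Int), cur)
      = (((k + (pvToks fl).length : Nat) : Int),
         List.foldl pvRep3 cur ((pvToks fl).zip ((vals.map PySem.Int.toChars).drop k))) := by
  intro fl
  induction fl with
  | nil =>
    intro k cur _
    simp [pvToks]
  | cons line fl ih =>
    intro k cur hlen
    by_cases hc : pvIsPctLine (pvStripL line) = true
    · rw [pvToks_cons_pos fl hc] at hlen ⊢
      simp only [List.foldl_cons, if_pos hc]
      have hk : k < vals.length := by simp at hlen; omega
      have hget : PySem.List.pyGetD vals ((k : Nat) : Int) 0 = vals[k] := by
        rw [PySem.List.pyGetD_natCast]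
        exact List.getD_eq_getElem vals 0 hk
      have hcast : ((k : Nat) : Int) + 1 = (((k + 1 : Nat)) : Int) := by push_cast; ring
      rw [hget, hcast]
      rw [pvRep_eq_replace _ _ _ (by simp), pvRep_eq_replace _ _ _ (by simp),
        pvRep_eq_replace _ _ _ (by simp)]
      rw [ih (k + 1) _ (by simp at hlen ⊢; omega)]
      have hdrop : (vals.map PySem.Int.toChars).drop k
          = PySem.Int.toChars vals[k] :: (vals.map PySem.Int.toChars).drop (k + 1) := by
        rw [List.drop_eq_getElem_cons (by simpa using hk)]
        simp
      rw [hdrop]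
      simp only [List.zip_cons_cons, List.foldl_cons]
      rw [Prod.mk.injEq]
      exact ⟨by simp; omega, rfl⟩
    · rw [pvToks_cons_neg fl hc] at hlen ⊢
      simp only [List.foldl_cons, if_neg hc]
      exact ih k cur hlen


theorem pvCollect_id (fl : List String) (a : List (List Char)) :
    fl.foldl (fun acc line =>
      if pvIsPctLine (pvStripL line) then acc ++ [pvTokOf (pvStripL line)] else acc) a
    = a ++ pvToks fl := by
  have h := pvCollect (fun t => t) fl a
  simpa using h

theorem pvLoopA0 (vals : List Int) (fl : List String) (cur : List Char)
    (hlen : (pvToks fl).length ≤ vals.length) :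
    fl.foldl (fun (p : Int × List Char) line =>
        if pvIsPctLine (pvStripL line) then
          (p.1 + 1,
            PySem.Chars.replace
              (PySem.Chars.replace
                (PySem.Chars.replace p.2
                  ('%' :: (pvTokOf (pvStripL line) ++ [' ']))
                  (pvSent ++ PySem.Int.toChars (PySem.List.pyGetD vals p.1 0) ++ [' ']))
                ('%' :: (pvTokOf (pvStripL line) ++ [',']))
                (pvSent ++ PySem.Int.toChars (PySem.List.pyGetD vals p.1 0) ++ [',']))
              ('%' :: (pvTokOf (pvStripL line) ++ ['\n']))
              (pvSent ++ PySem.Int.toChars (PySem.List.pyGetD vals p.1 0) ++ ['\n']))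
        else p) ((0 : Int), cur)
      = (((pvToks fl).length : Int),
         List.foldl pvRep3 cur ((pvToks fl).zip (vals.map PySem.Int.toChars))) := by
  have h0 : ((0 : Nat) : Int) = (0 : Int) := by norm_num
  have h := pvLoopA vals fl 0 cur (by omega)
  rw [h0] at h
  simpa using h

theorem pvMaster (toks : List (List Char)) (valsInt : List Int) (s : List Char)
    (hlen : toks.length = valsInt.length)
    (hclean : ∀ t ∈ toks, pvCleanStr t)
    (hns : ¬ pvSent <:+: s) :
    pvRep pvSent ['%'] (List.foldl pvRep3 s (toks.zip (valsInt.map PySem.Int.toChars)))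
      = pvOut (pvSegs
          ((toks.zip valsInt).foldl (fun d p => d.setdefault p.1 (PySem.Int.toChars p.2))
            PySem.Dict.empty).get? s) := by
  set look := ((toks.zip valsInt).foldl (fun d p => d.setdefault p.1 (PySem.Int.toChars p.2))
    PySem.Dict.empty).get? with hlookdef
  set AP := toks.zip (valsInt.map PySem.Int.toChars) with hapdef
  have hzipmap : AP = (toks.zip valsInt).map (fun p => (p.1, PySem.Int.toChars p.2)) := by
    rw [hapdef, List.zip_map_right]
    rfl
  have hget : ∀ t, look t = ((toks.zip valsInt).lookup t).map PySem.Int.toChars := by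
    intro t
    rw [hlookdef, pvDict_get]
    simp
  have hgetAP : ∀ t, look t = AP.lookup t := by
    intro t
    rw [hget, hzipmap, pvLookup_map_toChars]
  have hcl : pvLookClean look := by
    intro t v h
    rw [hget] at h
    obtain ⟨n, hn, hv⟩ := Option.map_eq_some_iff.1 h
    have hmem := pvLookup_mem hn
    have ht : t ∈ toks := (List.of_mem_zip hmem).1
    exact ⟨hclean t ht, hv ▸ pvToChars_clean n⟩
  have HAP : ∀ p ∈ AP, pvCleanStr p.1 ∧ pvCleanStr p.2 := by
    intro p hp
    rw [hzipmap] at hp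
    obtain ⟨q, hq, he⟩ := List.mem_map.1 hp
    subst he
    exact ⟨hclean _ (List.of_mem_zip hq).1, pvToChars_clean _⟩
  have HLOOK : ∀ p ∈ AP, ∃ v0, look p.1 = some v0 := by
    intro p hp
    rw [hgetAP]
    exact pvLookup_mem_some hp
  have HFIRST : ∀ pre p suf, AP = pre ++ p :: suf → (∀ q ∈ pre, q.1 ≠ p.1) →
      look p.1 = some p.2 := by
    intro pre p suf hsplit hfree
    rw [hgetAP, hsplit, List.lookup_append, pvLookup_none hfree]
    obtain ⟨p1, p2⟩ := p
    rw [List.lookup_cons]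
    simp
  have hgnil : pvFlat (fun t' _ => ([] : List (List Char × List Char)).any (fun q => t' == q.1))
      (pvSegs look s) = s := by
    rw [show (fun (t' : List Char) (_ : Char) =>
        ([] : List (List Char × List Char)).any (fun q => t' == q.1))
      = (fun _ _ => false) from by funext t' d'; simp]
    exact pvFlat_false look s
  conv_lhs => rw [show s = pvFlat (fun t' _ => ([] : List (List Char × List Char)).any
    (fun q => t' == q.1)) (pvSegs look s) from hgnil.symm]
  rw [pvFold_flat hcl s AP HAP HLOOK HFIRST AP [] rfl]
  rw [show pvFlat (fun t' _ => AP.any (fun q => t' == q.1)) (pvSegs look s)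
      = pvFlat (fun _ _ => true) (pvSegs look s) from pvFlat_congr ?_]
  · exact pvRep_sent hcl hns
  · intro t' v' d' hm
    have hl := (pvSeg_mat_mem hm).1
    rw [hgetAP] at hl
    have hmem := pvLookup_mem hl
    rw [List.any_eq_true]
    exact ⟨(t', v'), hmem, by simp⟩

theorem pvToks_mem_clean {f_list : List String} (hpre : Pre_rename_percentages f_list "")
    {t : List Char} (ht : t ∈ pvToks f_list) : pvCleanStr t := by
  simp only [pvToks, List.mem_map, List.mem_filter] at ht
  obtain ⟨st, ⟨hst, hpct⟩, he⟩ := ht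
  obtain ⟨line, hline, hstrip⟩ := hst
  subst he
  have := (hpre line hline (by rw [hstrip]; exact hpct)).2
  rw [hstrip] at this
  intro c hc
  exact pvTokChar_clean (by
    rw [List.all_eq_true] at this
    exact this c hc)

-- ---- tightness: A's output never contains the sentinel, B's output keeps it ----
theorem pvPref_rep : ∀ (t w : List Char), w <+: pvRep pvSent ['%'] t →
    (∀ c ∈ w, c ≠ '%') → w ≠ [] → w <+: t := by
  intro t
  induction t using pvRep.induct pvSent with
  | case1 =>
    intro w h hw hne
    rw [pvRep] at h
    exact absurd (List.prefix_nil.1 h) hne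
  | case2 c t hif ih =>
    intro w h hw hne
    exfalso
    rw [pvRep, if_pos hif] at h
    cases w with
    | nil => exact hne rfl
    | cons w0 w' =>
      have := (List.cons_prefix_cons.1 (by simpa using h)).1
      exact hw w0 (by simp) this
  | case3 c t hif ih =>
    intro w h hw hne
    rw [pvRep, if_neg hif] at h
    cases w with
    | nil => exact absurd rfl hne
    | cons w0 w' =>
      obtain ⟨h1, h2⟩ := List.cons_prefix_cons.1 h
      subst h1
      by_cases hw' : w' = []
      · subst hw'; exact ⟨t, rfl⟩
      · exact List.cons_prefix_cons.2 ⟨rfl, ih w' h2 (fun c hc => hw c (by simp [hc])) hw'⟩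

theorem pvNoSent_rep (t : List Char) : ¬ pvSent <:+: pvRep pvSent ['%'] t := by
  have hs : pvSent = '@' :: ['&','@','\''] := rfl
  induction t using pvRep.induct pvSent with
  | case1 =>
    rw [pvRep]
    intro h
    have := List.eq_nil_of_infix_nil h
    simp [pvSent] at this
  | case2 c t hif ih =>
    rw [pvRep, if_pos hif]
    intro h
    rw [List.singleton_append] at h
    rcases List.infix_cons_iff.1 h with h | h
    · rw [hs] at h
      exact absurd (List.cons_prefix_cons.1 h).1 (by decide)
    · exact ih h
  | case3 c t hif ih =>
    rw [pvRep, if_neg hif]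
    intro h
    rcases List.infix_cons_iff.1 h with h | h
    · have hp : pvSent <+: c :: t := by
        rw [hs] at h ⊢
        obtain ⟨h1, h2⟩ := List.cons_prefix_cons.1 h
        subst h1
        refine List.cons_prefix_cons.2 ⟨rfl, ?_⟩
        refine pvPref_rep t _ h2 ?_ (by simp)
        intro x hx
        have hx' : x ∈ pvSent := by rw [hs]; exact List.mem_cons_of_mem _ hx
        exact pvSent_no_pct x hx'
      exact hif ⟨by simp [pvSent], List.isPrefixOf_iff_prefix.2 hp⟩
    · exact ih h

theorem pvInfix_skip_clean {cand r2 : List Char} {d : Char}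
    (hcand : ∀ c ∈ cand, c ≠ '@') (hd : d ≠ '@')
    (h : pvSent <:+: cand ++ d :: r2) : pvSent <:+: r2 := by
  induction cand with
  | nil =>
    rcases List.infix_cons_iff.1 (by simpa using h) with h | h
    · exact absurd (List.cons_prefix_cons.1 (by simpa [pvSent] using h)).1.symm hd
    · exact h
  | cons a cand' ih =>
    rcases List.infix_cons_iff.1 (by simpa using h) with h | h
    · exact absurd (List.cons_prefix_cons.1 (by simpa [pvSent] using h)).1.symm
        (hcand a (by simp))
    · exact ih (fun c hc => hcand c (by simp [hc])) h

theorem pvKeep_sent {look : List Char → Option (List Char)} (hcl : pvLookClean look)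
    {s : List Char} (h : pvSent <:+: s) : pvSent <:+: pvOut (pvSegs look s) := by
  induction s using pvSegs.induct look with
  | case1 =>
    have := List.eq_nil_of_infix_nil h
    simp [pvSent] at this
  | case2 c r hc d r2 hdrop v hlook ih =>
    rw [pvSegs_mat hc hdrop hlook, pvOut]
    have hc' : c = '%' := by simpa using hc
    rcases List.infix_cons_iff.1 h with h | h
    · exfalso
      have := (List.cons_prefix_cons.1 (by simpa [pvSent] using h)).1
      rw [hc'] at this; exact absurd this.symm (by decide)
    · have hr : pvSent <:+: r2 := by
        have hr' : r = List.takeWhile (fun x => !pvIsDelim x) r ++ d :: r2 := by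
          conv_lhs => rw [← List.takeWhile_append_dropWhile
            (p := fun x => !pvIsDelim x) (l := r), hdrop]
        rw [hr'] at h
        refine pvInfix_skip_clean ?_ ?_ h
        · intro x hx; exact ((hcl _ _ hlook).1 x hx).2.1
        · have hd2 : pvIsDelim d = true := by
            have := pvDropWhile_head_false hdrop; simpa using this
          exact (pvDelim_ne hd2).2
      exact List.infix_cons (List.infix_append_of_infix_right (List.infix_cons (ih hr)))
  | case3 c r hc d r2 hdrop hlook ih =>
    rw [pvSegs_pctnolook hc hdrop hlook, pvOut]
    rcases List.infix_cons_iff.1 h with h | h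
    · exfalso
      have := (List.cons_prefix_cons.1 (by simpa [pvSent] using h)).1
      have hc' : c = '%' := by simpa using hc
      rw [hc'] at this; exact absurd this.symm (by decide)
    · exact List.infix_cons (ih h)
  | case4 c r hc hdrop ih =>
    rw [pvSegs_pctnodrop hc hdrop, pvOut]
    rcases List.infix_cons_iff.1 h with h | h
    · exfalso
      have := (List.cons_prefix_cons.1 (by simpa [pvSent] using h)).1
      have hc' : c = '%' := by simpa using hc
      rw [hc'] at this; exact absurd this.symm (by decide)
    · exact List.infix_cons (ih h)
  | case5 c r hc ih =>
    rw [pvSegs_chr hc, pvOut]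
    rcases List.infix_cons_iff.1 h with h | h
    · -- the sentinel sits at the head of s: its four chars are all non-'%', so they are
      -- four chr segments and survive into the output
      obtain ⟨h1, h2⟩ := List.cons_prefix_cons.1 (by simpa [pvSent] using h)
      subst h1
      obtain ⟨z, hz⟩ := h2
      have hr : r = '&' :: '@' :: '\'' :: z := by rw [← hz]; simp
      subst hr
      rw [pvSegs_chr (by decide), pvOut, pvSegs_chr (by decide), pvOut,
        pvSegs_chr (by decide), pvOut]
      exact ⟨[], pvOut (pvSegs look z), by simp [pvSent]⟩
    · exact List.infix_cons (ih h)

theorem pvMapLookClean (toks : List (List Char)) (valsInt : List Int)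
    (hclean : ∀ t ∈ toks, pvCleanStr t) :
    pvLookClean ((toks.zip valsInt).foldl (fun d p => d.setdefault p.1 (PySem.Int.toChars p.2))
      PySem.Dict.empty).get? := by
  intro t v h
  rw [pvDict_get] at h
  simp only [PySem.Dict.get?_empty, Option.none_or] at h
  obtain ⟨n, hn, hv⟩ := Option.map_eq_some_iff.1 h
  have hmem := pvLookup_mem hn
  exact ⟨hclean t (List.of_mem_zip hmem).1, hv ▸ pvToChars_clean n⟩
-- ===== VERDICT (by name: the statement is the Claim_ definition above) =====
theorem rename_percentages_spec : Claim_unchanged_rename_percentages := by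
  intro f_list f_string hdom hpre
  unfold Spec_rename_percentages
  intro hnd
  unfold rename_percentages rename_percentages_alt
  simp only [pvCollect_id, pvCollect (fun t => (PySem.Int.ofChars? t).getD 0), List.nil_append]
  rw [pvLoopA0 _ f_list f_string.toList (by simp [PySem.List.length_sorted])]
  simp only []
  rw [pvRep_eq_replace _ _ _ (by simp [pvSent])]
  rw [pvScan_eq_out]
  refine congrArg String.ofList (pvMaster (pvToks f_list) _ f_string.toList ?_ ?_ ?_)
  · simp [PySem.List.length_sorted]
  · exact fun t ht => pvToks_mem_clean hpre ht
  · intro hinf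
    apply hnd
    unfold D_rename_percentages
    rw [PySem.Str.isIn_iff_infix]
    rwa [show pvSent = "@&@'".toList from by decide] at hinf

theorem rename_percentages_changed : Claim_changed_rename_percentages := by
  unfold Claim_changed_rename_percentages
  refine ⟨by decide, by decide, by decide, by decide, ?_, by decide⟩
  show String.ofList (pvScan _ "@&@'".toList) = "@&@'"
  rw [show "@&@'".toList = ['@','&','@','\''] from by decide]
  rw [pvScan, pvScan, pvScan, pvScan, pvScan]
  decide

theorem rename_percentages_tight : Claim_exact_rename_percentages := by
  intro f_list f_string hdom hpre hd heq
  unfold rename_percentages rename_percentages_alt at heq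
  simp only [pvCollect_id, pvCollect (fun t => (PySem.Int.ofChars? t).getD 0),
    List.nil_append] at heq
  rw [pvLoopA0 _ f_list f_string.toList (by simp [PySem.List.length_sorted])] at heq
  rw [pvRep_eq_replace _ _ _ (by simp [pvSent]), pvScan_eq_out] at heq
  have hlist := String.ofList_inj.mp heq
  have hsent_in : pvSent <:+: f_string.toList := by
    unfold D_rename_percentages at hd
    rw [PySem.Str.isIn_iff_infix] at hd
    rwa [show "@&@'".toList = pvSent from by decide] at hd
  have hB := pvKeep_sent
    (pvMapLookClean (pvToks f_list)
      (PySem.List.sorted ((pvToks f_list).map (fun t => (PySem.Int.ofChars? t).getD 0))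
        (fun x => x))
      (fun t ht => pvToks_mem_clean hpre ht)) hsent_in
  rw [← hlist] at hB
  exact pvNoSent_rep _ hB
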